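-- pv_equiv track=rewrite | github.com/BuchuKim/buchuPS | 2775.py | people
-- ===== SOURCE A (Python) =====
-- def people(a,b):
--     building = [[i for i in range(1,b+1)]]
--     # 1,2,3, ..., b
--     for i in range(1,a+1):
--         section = [1]
--         for j in range(1,b):
--             section.append(section[j-1]+building[i-1][j])
--         building.append(section)
--     return building[a][b-1]
-- ===== SOURCE B (Python) =====
-- def people(a, b):
--     # number of people = binomial(a+b, b-1), computed by the usual
--     # exact multiplicative scheme (each division is exact)
--     res = 1
--     for k in range(b - 1):
--         res = res * (a + 2 + k) // (k + 1)
--     return res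
-- ===== Notes on version B (the rewrite author's own statement) =====
-- stated objective: faster
-- what changed: Replaced the (a+1) x b dynamic-programming table by the closed-form binomial coefficient C(a+b, b-1), computed with a single exact multiplicative loop of b-1 steps.
-- outside the precondition, e.g. on people(-1, 3): A returns 3, B returns 1
import Mathlib
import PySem

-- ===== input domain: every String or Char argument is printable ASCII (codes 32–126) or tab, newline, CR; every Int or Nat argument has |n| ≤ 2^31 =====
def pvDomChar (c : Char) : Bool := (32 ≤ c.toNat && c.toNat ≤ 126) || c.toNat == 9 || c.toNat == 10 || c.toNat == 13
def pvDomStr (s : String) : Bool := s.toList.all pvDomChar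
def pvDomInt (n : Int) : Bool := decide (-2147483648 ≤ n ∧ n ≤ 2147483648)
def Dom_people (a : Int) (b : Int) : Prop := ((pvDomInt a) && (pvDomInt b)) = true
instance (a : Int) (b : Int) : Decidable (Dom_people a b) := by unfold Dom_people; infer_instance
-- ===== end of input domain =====

-- B replaces A's (a+1)×b dynamic-programming table by the closed-form binomial
-- coefficient C(a+b, b-1) computed with one exact multiplicative loop (faster in a timing run).


-- ===== PORT A =====
def people (a : Int) (b : Int) : Int :=
  let building : List (List Int) := [PySem.List.pyRange 1 (b + 1) 1]
  let building :=
    (PySem.List.pyRange 1 (a + 1) 1).foldl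
      (fun bld i =>
        let sect :=
          (PySem.List.pyRange 1 b 1).foldl
            (fun sec j =>
              sec ++ [PySem.List.pyGetD sec (j - 1) 0 +
                      PySem.List.pyGetD (PySem.List.pyGetD bld (i - 1) []) j 0])
            [1]
        bld ++ [sect])
      building
  PySem.List.pyGetD (PySem.List.pyGetD building a []) (b - 1) 0

-- ===== PORT B =====
def people_alt (a : Int) (b : Int) : Int :=
  (PySem.List.pyRange 0 (b - 1) 1).foldl
    (fun res k => PySem.Int.floordiv (res * (a + 2 + k)) (k + 1)) 1

-- ===== PRECONDITION & SPEC =====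
-- Pre_ excludes exactly the inputs where A raises IndexError (a ≤ -2; a = 0 ∧ b ≤ 0; a ≥ 1 ∧ b ≤ -1)
-- and the single line a = -1 (b ≥ 1), where A returns the first row's entry b only by accidental
-- negative-index wraparound of building[-1]; the b = 0, a ≥ 1 wraparound (A returns 1) is kept inside and matched.
def Pre_people (a : Int) (b : Int) : Prop := (0 ≤ a ∧ 1 ≤ b) ∨ (1 ≤ a ∧ b = 0)
instance (a : Int) (b : Int) : Decidable (Pre_people a b) := by unfold Pre_people; infer_instance
def pvWitness_people : Int × Int := (3, 4)

def Spec_people (a : Int) (b : Int) (out : Int) : Prop := out = people_alt a b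
instance (a : Int) (b : Int) (out : Int) : Decidable (Spec_people a b out) := by unfold Spec_people; infer_instance

-- ===== CLAIM (what is proved, stated in full; the proofs are below) =====
def Claim_equal_people : Prop := ∀ (a : Int) (b : Int), Dom_people a b → Pre_people a b → Spec_people a b (people a b)

-- ===== LEMMAS AND PROOFS =====

-- row i of A's table in closed form: entry j is C(i+j+1, i+1); pvRow i m is its length-m prefix.
def pvG (i j : ℕ) : Int := (Nat.choose (i + j + 1) (i + 1) : ℤ)
def pvRow (i m : ℕ) : List Int := (List.range m).map (pvG i)

-- A's first row [1..b] is row 0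
lemma pvRow_zero (bn : ℕ) : PySem.List.pyRange 1 ((bn : ℤ) + 1) 1 = pvRow 0 bn := by
  rw [PySem.List.pyRange_one]
  have h : ((bn : ℤ) + 1 - 1).toNat = bn := by omega
  rw [h]
  unfold pvRow pvG
  refine List.map_congr_left ?_
  intro j hj
  simp [Nat.choose_one_right]
  omega

-- invariant of A's inner loop: after the prefix range(1, m) it has built the length-m prefix of row (i+1)
lemma pv_section_inv (bn i : ℕ) (m : ℕ) (h1 : 1 ≤ m) (hm : m ≤ bn) :
    (PySem.List.pyRange 1 (m : ℤ) 1).foldl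
      (fun sec j => sec ++ [PySem.List.pyGetD sec (j - 1) 0 + PySem.List.pyGetD (pvRow i bn) j 0]) [1]
    = pvRow (i + 1) m := by
  induction m with
  | zero => omega
  | succ m ih =>
    by_cases hm0 : m = 0
    · subst hm0
      rw [show ((1:ℕ):ℤ) = 1 by norm_num, PySem.List.pyRange_one_eq_nil (by omega)]
      simp [pvRow, pvG, List.range_succ]
    · have hm1 : 1 ≤ m := by omega
      rw [show ((m+1:ℕ):ℤ) = (m:ℤ)+1 by push_cast; ring,
        PySem.List.pyRange_one_succ_right (by exact_mod_cast hm1), List.foldl_append,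
        ih hm1 (by omega)]
      simp only [List.foldl_cons, List.foldl_nil]
      have e1 : PySem.List.pyGetD (pvRow (i+1) m) ((m:ℤ) - 1) 0 = pvG (i+1) (m-1) := by
        rw [show (m:ℤ) - 1 = ((m-1:ℕ):ℤ) by omega, PySem.List.pyGetD_natCast]
        unfold pvRow
        rw [PySem.List.getD_map_range _ _ _ _ (by omega)]
      have e2 : PySem.List.pyGetD (pvRow i bn) ((m:ℤ)) 0 = pvG i m := by
        rw [PySem.List.pyGetD_natCast]
        unfold pvRow
        rw [PySem.List.getD_map_range _ _ _ _ (by omega)]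
      rw [e1, e2]
      unfold pvRow
      rw [List.range_succ, List.map_append]
      congr 1
      simp only [List.map_cons, List.map_nil]
      congr 1
      unfold pvG
      have h3 : i + 1 + (m-1) + 1 = i + m + 1 := by omega
      rw [h3, show i + 1 + m + 1 = (i+m+1)+1 by omega, show i+1+1 = (i+1)+1 by omega,
        Nat.choose_succ_succ' (i+m+1) (i+1)]
      push_cast
      ring

-- A's inner loop turns row i into row (i+1)
lemma pv_section (bn i : ℕ) (hbn : 1 ≤ bn) :
    (PySem.List.pyRange 1 (bn : ℤ) 1).foldl
      (fun sec j => sec ++ [PySem.List.pyGetD sec (j - 1) 0 + PySem.List.pyGetD (pvRow i bn) j 0]) [1]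
    = pvRow (i + 1) bn := pv_section_inv bn i bn hbn le_rfl

-- A's outer loop builds rows 0..t
lemma pv_build (bn : ℕ) (hbn : 1 ≤ bn) (t : ℕ) :
    (PySem.List.pyRange 1 ((t : ℤ) + 1) 1).foldl
      (fun bld i =>
        bld ++ [(PySem.List.pyRange 1 (bn : ℤ) 1).foldl
          (fun sec j =>
            sec ++ [PySem.List.pyGetD sec (j - 1) 0 +
                    PySem.List.pyGetD (PySem.List.pyGetD bld (i - 1) []) j 0]) [1]])
      [pvRow 0 bn]
    = (List.range (t + 1)).map (fun i => pvRow i bn) := by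
  induction t with
  | zero => simp [PySem.List.pyRange_one_eq_nil]
  | succ t ih =>
    rw [show ((t+1:ℕ):ℤ) + 1 = ((t:ℤ)+1)+1 by push_cast; ring,
      PySem.List.pyRange_one_succ_right (by omega), List.foldl_append, ih]
    simp only [List.foldl_cons, List.foldl_nil]
    have hprev : PySem.List.pyGetD ((List.range (t+1)).map (fun i => pvRow i bn)) ((t:ℤ) + 1 - 1) [] = pvRow t bn := by
      rw [show (t:ℤ) + 1 - 1 = ((t:ℕ):ℤ) by ring, PySem.List.pyGetD_natCast,
        PySem.List.getD_map_range _ _ _ _ (by omega)]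
    rw [hprev, pv_section bn t hbn, List.range_succ (n := t+1), List.map_append, List.range_succ, List.map_append]
    simp

-- B's loop computes the binomial coefficient: after n steps the result is C(a'+1+n, n)
lemma pv_alt_loop (a' : ℕ) (n : ℕ) :
    (PySem.List.pyRange 0 (n : ℤ) 1).foldl
      (fun res k => PySem.Int.floordiv (res * ((a' : ℤ) + 2 + k)) (k + 1)) 1
    = (Nat.choose (a' + 1 + n) n : ℤ) := by
  induction n with
  | zero => simp [PySem.List.pyRange_one_eq_nil]
  | succ n ih =>
    rw [show ((n+1:ℕ):ℤ) = (n:ℤ)+1 by push_cast; ring]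
    rw [PySem.List.pyRange_one_succ_right (by positivity), List.foldl_append]
    simp only [List.foldl_cons, List.foldl_nil, ih]
    have key : (a' + 2 + n) * Nat.choose (a' + 1 + n) n = Nat.choose (a' + 2 + n) (n + 1) * (n + 1) := by
      have h := Nat.add_one_mul_choose_eq (a' + 1 + n) n
      simpa [Nat.succ_eq_add_one, show a' + 1 + n + 1 = a' + 2 + n from by omega] using h
    have : ((Nat.choose (a' + 1 + n) n : ℤ)) * ((a' : ℤ) + 2 + (n:ℤ)) = ((Nat.choose (a'+1+n) n * (a'+2+n) : ℕ) : ℤ) := by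
      push_cast; ring
    rw [this, show ((n:ℤ)+1) = ((n+1 : ℕ) : ℤ) by push_cast; ring, PySem.Int.floordiv_natCast]
    have hdiv : Nat.choose (a'+1+n) n * (a'+2+n) / (n+1) = Nat.choose (a'+2+n) (n+1) := by
      rw [Nat.mul_comm, key]; exact Nat.mul_div_cancel _ (by omega)
    rw [hdiv]
    congr 2
    omega

-- ===== VERDICT (by name: the statement is the Claim_ definition above) =====
theorem people_spec : Claim_equal_people := by
  intro a b _ hpre
  unfold Spec_people
  rcases hpre with ⟨ha, hb⟩ | ⟨ha, hb⟩
  · -- main case: a ≥ 0, b ≥ 1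
    obtain ⟨a', rfl⟩ : ∃ a' : ℕ, a = (a' : ℤ) := ⟨a.toNat, by omega⟩
    obtain ⟨bn, rfl⟩ : ∃ bn : ℕ, b = (bn : ℤ) := ⟨b.toNat, by omega⟩
    have hbn : 1 ≤ bn := by exact_mod_cast hb
    unfold people people_alt
    simp only []
    rw [pvRow_zero bn, pv_build bn hbn a']
    have h1 : PySem.List.pyGetD ((List.range (a'+1)).map (fun i => pvRow i bn)) ((a':ℤ)) [] = pvRow a' bn := by
      rw [PySem.List.pyGetD_natCast, PySem.List.getD_map_range _ _ _ _ (by omega)]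
    rw [h1]
    have h2 : PySem.List.pyGetD (pvRow a' bn) ((bn:ℤ) - 1) 0 = pvG a' (bn - 1) := by
      rw [show (bn:ℤ) - 1 = ((bn-1:ℕ):ℤ) by omega, PySem.List.pyGetD_natCast]
      unfold pvRow
      rw [PySem.List.getD_map_range _ _ _ _ (by omega)]
    rw [h2, show (bn:ℤ) - 1 = ((bn-1:ℕ):ℤ) by omega, pv_alt_loop]
    unfold pvG
    have hsymm := Nat.choose_symm (n := a' + bn) (k := a' + 1) (by omega)
    rw [show a' + (bn-1) + 1 = a' + bn by omega, show a' + 1 + (bn-1) = a' + bn by omega]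
    rw [show a' + bn - (a' + 1) = bn - 1 by omega] at hsymm
    exact_mod_cast hsymm.symm
  · -- degenerate case: a ≥ 1, b = 0 (Python returns building[a][-1] = 1)
    subst hb
    obtain ⟨a', rfl⟩ : ∃ a' : ℕ, a = (a' : ℤ) := ⟨a.toNat, by omega⟩
    have ha1 : 1 ≤ a' := by exact_mod_cast ha
    unfold people people_alt
    have e1 : PySem.List.pyRange 0 ((0:ℤ)-1) 1 = [] := PySem.List.pyRange_one_eq_nil (by omega)
    have e2 : PySem.List.pyRange 1 ((0:ℤ)+1) 1 = [] := PySem.List.pyRange_one_eq_nil (by omega)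
    have e3 : PySem.List.pyRange 1 (0:ℤ) 1 = [] := PySem.List.pyRange_one_eq_nil (by omega)
    simp only [e1, e2, e3, List.foldl_nil]
    rw [PySem.List.foldl_append_singleton_eq_map (f := fun _ => ([1] : List Int))]
    have h1 : PySem.List.pyGetD ([([] : List Int)] ++ (PySem.List.pyRange 1 ((a':ℤ)+1) 1).map (fun _ => ([1] : List Int))) ((a':ℤ)) [] = [1] := by
      have hlen : (PySem.List.pyRange 1 ((a':ℤ) + 1) 1).length = a' := by
        rw [PySem.List.length_pyRange_one]; omega
      rw [PySem.List.pyGetD_natCast]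
      rw [List.getD_eq_getElem?_getD, List.getElem?_append_right (by simpa using by omega)]
      simp [hlen, show a' - 1 < a' from by omega]
    rw [h1]
    decide
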